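-- pv_equiv track=rewrite | github.com/Thoufeek19/leetsync | 2264-largest-3-same-digit-number-in-string/2264-largest-3-same-digit-number-in-string.py | largestGoodInteger
-- ===== SOURCE A (Python) =====
-- def largestGoodInteger(num: str) -> str:
--     ans=[]
--
--     for i in range(len(num)):
--         if i+2<len(num):
--             if num[i]==num[i+1]==num[i+2]:
--
--                 a=""
--                 a+=num[i]
--                 a+=num[i+1]
--                 a+=num[i+2]
--                 ans.append(a)
--     if len(ans)==0:
--         return ""
--     else:
--         return max(ans)
-- ===== SOURCE B (Python) =====
-- def largestGoodInteger(num: str) -> str: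
--     best = None
--     run = 1
--     for i in range(1, len(num)):
--         run = run + 1 if num[i] == num[i - 1] else 1
--         if run >= 3 and (best is None or num[i] > best):
--             best = num[i]
--     return best * 3 if best is not None else ""
-- ===== Notes on version B (the rewrite author's own statement) =====
-- stated objective: alternative
-- what changed: Instead of collecting every consecutive triple into a list and taking the lexicographic max of those 3-character strings, B does a single run-length scan that tracks the current run length and the best character whose run reached 3, returning that character tripled.
import Mathlib
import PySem

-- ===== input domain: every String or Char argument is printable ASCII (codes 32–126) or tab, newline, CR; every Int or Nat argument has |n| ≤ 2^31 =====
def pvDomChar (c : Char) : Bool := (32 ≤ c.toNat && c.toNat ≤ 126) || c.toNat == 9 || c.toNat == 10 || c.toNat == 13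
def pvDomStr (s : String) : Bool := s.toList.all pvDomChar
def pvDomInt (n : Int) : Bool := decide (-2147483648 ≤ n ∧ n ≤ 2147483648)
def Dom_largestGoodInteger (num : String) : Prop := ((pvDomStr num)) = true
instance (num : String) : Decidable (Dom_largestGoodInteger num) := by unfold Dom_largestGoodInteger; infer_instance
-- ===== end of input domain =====

-- B replaces A's collect-all-triples-then-max pass by a single run-length scan keeping the best run character (alternative decomposition, same return value).

-- ===== PORT A =====
def largestGoodInteger (num : String) : String :=
  let cs := num.toList
  let ans : List (List Char) := (PySem.List.pyRange 0 (cs.length : Int) 1).foldl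
    (fun ans i =>
      if i + 2 < (cs.length : Int) then
        if PySem.List.pyGetD cs i ' ' = PySem.List.pyGetD cs (i + 1) ' ' ∧
           PySem.List.pyGetD cs (i + 1) ' ' = PySem.List.pyGetD cs (i + 2) ' ' then
          ans ++ [[] ++ [PySem.List.pyGetD cs i ' '] ++ [PySem.List.pyGetD cs (i + 1) ' ']
                     ++ [PySem.List.pyGetD cs (i + 2) ' ']]
        else ans
      else ans) []
  if ans.length = 0 then ""
  else
    match PySem.List.max? ans (fun x => x) with
    | some m => String.ofList m
    | none => ""

-- ===== PORT B =====
def largestGoodInteger_alt (num : String) : String :=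
  let cs := num.toList
  let st := (PySem.List.pyRange 1 (cs.length : Int) 1).foldl
    (fun (st : Int × Option Char) i =>
      let c := PySem.List.pyGetD cs i ' '
      let run : Int := if c = PySem.List.pyGetD cs (i - 1) ' ' then st.1 + 1 else 1
      let best : Option Char :=
        if 3 ≤ run ∧ (match st.2 with | none => true | some b => decide (b < c)) = true
        then some c else st.2
      (run, best)) ((1 : Int), (none : Option Char))
  match st.2 with
  | some b => String.ofList (List.replicate 3 b)
  | none => ""

-- ===== PRECONDITION & SPEC =====
def Spec_largestGoodInteger (num : String) (out : String) : Prop := out = largestGoodInteger_alt num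
instance (num : String) (out : String) : Decidable (Spec_largestGoodInteger num out) := by unfold Spec_largestGoodInteger; infer_instance

-- ===== CLAIM (what is proved, stated in full; the proofs are below) =====
def Claim_equal_largestGoodInteger : Prop := ∀ (num : String), Dom_largestGoodInteger num → Spec_largestGoodInteger num (largestGoodInteger num)

-- ===== LEMMAS AND PROOFS =====

-- character at index i (all indices the programs touch are in range, so the default is never seen)
def gch (cs : List Char) (i : Nat) : Char := cs.getD i ' '

-- triple starting at i
def qB (cs : List Char) (i : Nat) : Bool :=
  decide (gch cs i = gch cs (i + 1)) && decide (gch cs (i + 1) = gch cs (i + 2))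

-- characters of the triples whose start index is < k, in order
def Sch (cs : List Char) (k : Nat) : List Char :=
  ((List.range k).filter (qB cs)).map (gch cs)

def rep3 (c : Char) : List Char := [c, c, c]

-- length of the equal run ending at index j (B's `run` variable)
def runlen (cs : List Char) : Nat → Int
  | 0 => 1
  | j + 1 => if gch cs (j + 1) = gch cs j then runlen cs j + 1 else 1

theorem rep3_lt_iff (a b : Char) : ((rep3 a : List Char) < rep3 b) ↔ a < b := by
  show (([a,a,a] : List Char) < [b,b,b]) ↔ a < b
  rw [List.cons_lt_cons_iff, List.cons_lt_cons_iff, List.cons_lt_cons_iff]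
  simp
  rintro rfl (h | ⟨-, h⟩) <;> exact h

theorem runlen_ge_one (cs : List Char) (j : Nat) : 1 ≤ runlen cs j := by
  cases j with
  | zero => simp [runlen]
  | succ m => simp only [runlen]; split <;> [skip; omega]
              have := runlen_ge_one cs m; omega

theorem runlen_ge_two_iff (cs : List Char) (j : Nat) :
    2 ≤ runlen cs j ↔ 1 ≤ j ∧ gch cs j = gch cs (j - 1) := by
  cases j with
  | zero => simp [runlen]
  | succ m =>
    simp only [runlen, Nat.add_sub_cancel]
    have := runlen_ge_one cs m
    constructor
    · intro h; split at h
      · exact ⟨by omega, by assumption⟩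
      · omega
    · rintro ⟨-, h⟩; rw [if_pos h]; omega

theorem runlen_ge_three_iff (cs : List Char) (k : Nat) :
    3 ≤ runlen cs k ↔ 2 ≤ k ∧ gch cs k = gch cs (k - 1) ∧ gch cs (k - 1) = gch cs (k - 2) := by
  cases k with
  | zero => simp [runlen]
  | succ m =>
    simp only [runlen, Nat.add_sub_cancel]
    have h2 := runlen_ge_two_iff cs m
    constructor
    · intro h; split at h
      · have h2' : 2 ≤ runlen cs m := by omega
        rw [h2] at h2'
        refine ⟨by omega, by assumption, ?_⟩
        rw [show m + 1 - 2 = m - 1 by omega]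
        exact h2'.2
      · omega
    · rintro ⟨hk, he1, he2⟩
      rw [if_pos he1]
      rw [show m + 1 - 2 = m - 1 by omega] at he2
      have : 2 ≤ runlen cs m := by rw [h2]; exact ⟨by omega, he2⟩
      omega

-- max? over an appended singleton is one more step of the running-max fold
theorem max?_append_singleton {α : Type} [LT α] [DecidableLT α] (l : List α) (c : α) :
    PySem.List.max? (l ++ [c]) (fun x => x) =
      match PySem.List.max? l (fun x => x) with
      | none => some c
      | some m => if m < c then some c else some m := by
  simp only [PySem.List.max?, List.foldl_append, List.foldl_cons, List.foldl_nil]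
  rfl

-- the running max commutes with the strictly monotone map rep3
theorem max?_map_rep3 (S : List Char) :
    PySem.List.max? (S.map rep3) (fun x => x) = (PySem.List.max? S (fun c => c)).map rep3 := by
  induction S using List.reverseRecOn with
  | nil => rfl
  | append_singleton t c ih =>
    rw [List.map_append, List.map_singleton, max?_append_singleton, max?_append_singleton, ih]
    cases PySem.List.max? t (fun c => c) with
    | none => rfl
    | some m =>
      show (if rep3 m < rep3 c then some (rep3 c) else some (rep3 m))
          = Option.map rep3 (if m < c then some c else some m)
      by_cases h : m < c
      · rw [if_pos h, if_pos ((rep3_lt_iff m c).mpr h)]; rfl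
      · rw [if_neg h, if_neg (fun hc => h ((rep3_lt_iff m c).mp hc))]; rfl

-- filtering range n on (i+2 < n && q i) is filtering range (n-2) on q
theorem filter_range_bound (n : Nat) (q : Nat → Bool) :
    (List.range n).filter (fun i => decide (i + 2 < n) && q i)
      = (List.range (n - 2)).filter q := by
  rcases lt_or_ge n 2 with h | h
  · have h2 : n - 2 = 0 := by omega
    rw [h2]
    apply List.filter_eq_nil_iff.mpr
    intro i hi
    simp only [List.mem_range] at hi
    simp [show ¬ (i + 2 < n) by omega]
  · obtain ⟨m, rfl⟩ : ∃ m, n = m + 2 := ⟨n - 2, by omega⟩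
    have : List.range (m + 2) = List.range m ++ [m, m + 1] := by
      rw [show m + 2 = (m + 1) + 1 from rfl, List.range_succ, List.range_succ]
      simp
    rw [this, List.filter_append]
    have h1 : (List.range m).filter (fun i => decide (i + 2 < m + 2) && q i)
        = (List.range m).filter q := by
      apply List.filter_congr
      intro i hi
      simp only [List.mem_range] at hi
      simp [show i + 2 < m + 2 by omega]
    have h2 : ([m, m + 1].filter (fun i => decide (i + 2 < m + 2) && q i)) = [] := by
      simp
    rw [h1, h2, List.append_nil]
    simp

-- A's loop computes exactly the triples of Sch, each blown up to a 3-character string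
theorem ansA_eq (cs : List Char) :
    (PySem.List.pyRange 0 (cs.length : Int) 1).foldl
      (fun ans i =>
        if i + 2 < (cs.length : Int) then
          if PySem.List.pyGetD cs i ' ' = PySem.List.pyGetD cs (i + 1) ' ' ∧
             PySem.List.pyGetD cs (i + 1) ' ' = PySem.List.pyGetD cs (i + 2) ' ' then
            ans ++ [[] ++ [PySem.List.pyGetD cs i ' '] ++ [PySem.List.pyGetD cs (i + 1) ' ']
                       ++ [PySem.List.pyGetD cs (i + 2) ' ']]
          else ans
        else ans) []
    = (Sch cs (cs.length - 2)).map rep3 := by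
  set n := cs.length with hn
  have hb : (fun (ans : List (List Char)) (i : Int) =>
      if i + 2 < (n : Int) then
        if PySem.List.pyGetD cs i ' ' = PySem.List.pyGetD cs (i + 1) ' ' ∧
           PySem.List.pyGetD cs (i + 1) ' ' = PySem.List.pyGetD cs (i + 2) ' ' then
          ans ++ [[] ++ [PySem.List.pyGetD cs i ' '] ++ [PySem.List.pyGetD cs (i + 1) ' ']
                     ++ [PySem.List.pyGetD cs (i + 2) ' ']]
        else ans
      else ans)
    = (fun ans i =>
        if (decide (i + 2 < (n : Int)) &&
            (decide (PySem.List.pyGetD cs i ' ' = PySem.List.pyGetD cs (i + 1) ' ') &&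
             decide (PySem.List.pyGetD cs (i + 1) ' ' = PySem.List.pyGetD cs (i + 2) ' '))) = true then
          ans ++ [[PySem.List.pyGetD cs i ' ', PySem.List.pyGetD cs (i + 1) ' ',
                   PySem.List.pyGetD cs (i + 2) ' ']]
        else ans) := by
    funext ans i
    by_cases h1 : i + 2 < (n : Int) <;> by_cases h2 : PySem.List.pyGetD cs i ' ' = PySem.List.pyGetD cs (i + 1) ' '
      <;> by_cases h3 : PySem.List.pyGetD cs (i + 1) ' ' = PySem.List.pyGetD cs (i + 2) ' '
      <;> simp [h1, h2, h3]
  rw [hb, PySem.List.foldl_append_if, PySem.List.pyRange_zero_nat, List.filter_map, List.map_map,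
      List.nil_append]
  have hfil : ((List.range n).filter
      ((fun i => (decide (i + 2 < (n : Int)) &&
            (decide (PySem.List.pyGetD cs i ' ' = PySem.List.pyGetD cs (i + 1) ' ') &&
             decide (PySem.List.pyGetD cs (i + 1) ' ' = PySem.List.pyGetD cs (i + 2) ' ')))) ∘ (fun k : Nat => (k : Int))))
      = (List.range n).filter (fun i => decide (i + 2 < n) && qB cs i) := by
    apply List.filter_congr
    intro i _
    have c1 : ((i : Int) + 1) = ((i + 1 : Nat) : Int) := by push_cast; ring
    have c2 : ((i : Int) + 2) = ((i + 2 : Nat) : Int) := by push_cast; ring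
    simp only [Function.comp, c1, c2, PySem.List.pyGetD_natCast, qB, gch]
    congr 1
    simp only [decide_eq_decide]
    omega
  rw [hfil, filter_range_bound n (qB cs)]
  rw [show (Sch cs (n - 2)).map rep3 = ((List.range (n - 2)).filter (qB cs)).map (rep3 ∘ gch cs) by
    simp [Sch, List.map_map]]
  apply List.map_congr_left
  intro i hi
  have hq : qB cs i = true := (List.mem_filter.mp hi).2
  simp only [qB, Bool.and_eq_true, decide_eq_true_eq] at hq
  have c1 : ((i : Int) + 1) = ((i + 1 : Nat) : Int) := by push_cast; ring
  have c2 : ((i : Int) + 2) = ((i + 2 : Nat) : Int) := by push_cast; ring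
  simp only [gch] at hq
  simp only [Function.comp, c1, c2, PySem.List.pyGetD_natCast, rep3, gch]
  rw [← hq.1, ← hq.2, ← hq.1]

-- B's loop invariant: after the iterations with i < k, `run` is the run length ending at k-1
-- and `best` is the running max of the triple characters seen so far
theorem Bfold (cs : List Char) (k : Nat) (hk1 : 1 ≤ k) (hkn : k ≤ cs.length) :
    (PySem.List.pyRange 1 (k : Int) 1).foldl
      (fun (st : Int × Option Char) i =>
        let c := PySem.List.pyGetD cs i ' '
        let run : Int := if c = PySem.List.pyGetD cs (i - 1) ' ' then st.1 + 1 else 1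
        let best : Option Char :=
          if 3 ≤ run ∧ (match st.2 with | none => true | some b => decide (b < c)) = true
          then some c else st.2
        (run, best)) ((1 : Int), (none : Option Char))
    = (runlen cs (k - 1), PySem.List.max? (Sch cs (k - 2)) (fun c => c)) := by
  induction k with
  | zero => omega
  | succ k ih =>
    rcases lt_or_ge k 1 with hk0 | hk0
    · -- k = 0 : the loop body has run zero times
      have : k = 0 := by omega
      subst this
      rw [show ((1 : Nat) : Int) = 1 from rfl, PySem.List.pyRange_one_eq_nil (by omega)]
      simp [runlen, Sch, PySem.List.max?]
    · have hcast : ((k + 1 : Nat) : Int) = (k : Int) + 1 := by push_cast; ring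
      rw [hcast, PySem.List.pyRange_one_succ_right (by exact_mod_cast hk0), List.foldl_append,
          ih hk0 (by omega)]
      simp only [List.foldl_cons, List.foldl_nil]
      have cK : PySem.List.pyGetD cs (k : Int) ' ' = gch cs k := by
        simp [PySem.List.pyGetD_natCast, gch]
      have cK1 : PySem.List.pyGetD cs ((k : Int) - 1) ' ' = gch cs (k - 1) := by
        rw [show ((k : Int) - 1) = ((k - 1 : Nat) : Int) by omega]
        simp [PySem.List.pyGetD_natCast, gch]
      have hrun : (if PySem.List.pyGetD cs (k : Int) ' ' = PySem.List.pyGetD cs ((k : Int) - 1) ' '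
          then runlen cs (k - 1) + 1 else 1) = runlen cs k := by
        rw [cK, cK1]
        conv_rhs => rw [show k = (k - 1) + 1 by omega]
        simp only [runlen]
        rw [show k - 1 + 1 = k by omega]
      rw [hrun]
      simp only [Nat.add_sub_cancel, cK]
      congr 1
      -- best component
      rcases lt_or_ge k 2 with hk2 | hk2
      · -- k = 1 : no triple can end here and Sch is unchanged
        have : k = 1 := by omega
        subst this
        have hno : ¬ (3 ≤ runlen cs 1) := by
          rw [runlen_ge_three_iff]; omega
        rw [if_neg (by rintro ⟨h3, -⟩; exact hno h3)]
      · -- k ≥ 2 : Sch grows by the start index k-2 iff the triple condition holds there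
        have hsplit : Sch cs (k + 1 - 2) =
            Sch cs (k - 2) ++ if qB cs (k - 2) then [gch cs (k - 2)] else [] := by
          rw [show k + 1 - 2 = (k - 2) + 1 by omega]
          simp only [Sch, List.range_succ, List.filter_append, List.map_append]
          congr 1
          by_cases hq : qB cs (k - 2) <;> simp [hq]
        by_cases hq : qB cs (k - 2)
        · -- a triple ends at k
          have hqe : gch cs (k - 2) = gch cs (k - 1) ∧ gch cs (k - 1) = gch cs k := by
            have := hq
            simp only [qB, Bool.and_eq_true, decide_eq_true_eq] at this
            rw [show k - 2 + 1 = k - 1 by omega, show k - 2 + 2 = k by omega] at this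
            exact this
          have h3 : 3 ≤ runlen cs k := by
            rw [runlen_ge_three_iff]
            exact ⟨hk2, hqe.2.symm, hqe.1.symm⟩
          rw [hsplit, if_pos hq, max?_append_singleton, hqe.1, hqe.2]
          cases hmx : PySem.List.max? (Sch cs (k - 2)) (fun c => c) with
          | none => simp [h3]
          | some m =>
            by_cases hlt : m < gch cs k
            · simp [h3, hlt]
            · simp [h3, hlt]
        · -- no triple ends at k
          have hno : ¬ (3 ≤ runlen cs k) := by
            rw [runlen_ge_three_iff]
            rintro ⟨-, h1, h2⟩
            apply hq
            simp only [qB, Bool.and_eq_true, decide_eq_true_eq]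
            rw [show k - 2 + 1 = k - 1 by omega, show k - 2 + 2 = k by omega]
            exact ⟨h2.symm, h1.symm⟩
          rw [hsplit, if_neg hq, List.append_nil, if_neg (by rintro ⟨h3, -⟩; exact hno h3)]

-- ===== VERDICT (by name: the statement is the Claim_ definition above) =====
theorem largestGoodInteger_spec : Claim_equal_largestGoodInteger := by
  intro num _
  show largestGoodInteger num = largestGoodInteger_alt num
  simp only [largestGoodInteger, largestGoodInteger_alt]
  rw [ansA_eq num.toList]
  rcases Nat.eq_zero_or_pos num.toList.length with h0 | hpos
  · rw [h0, show ((0 : Nat) : Int) = 0 from rfl, PySem.List.pyRange_one_eq_nil (by omega)]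
    simp [Sch]
  · rw [Bfold num.toList num.toList.length hpos le_rfl]
    cases hmx : PySem.List.max? (Sch num.toList (num.toList.length - 2)) (fun c => c) with
    | none =>
      have hS : Sch num.toList (num.toList.length - 2) = [] :=
        (PySem.List.max?_eq_none_iff _ _).mp hmx
      rw [hS]; simp
    | some b =>
      have hS : Sch num.toList (num.toList.length - 2) ≠ [] := by
        intro h; rw [h] at hmx; simp [PySem.List.max?] at hmx
      rw [if_neg (by simpa using fun h => hS (List.eq_nil_of_length_eq_zero h)),
          max?_map_rep3, hmx]
      simp [rep3, List.replicate]
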